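-- pv_equiv track=rewrite | github.com/SantipBarber/ai-odoo-finder | backend/app/metrics/benchmark_metrics.py | first_relevant_position
-- ===== SOURCE A (Python) =====
-- from typing import List, Dict, Optional
--
-- def first_relevant_position(
--     retrieved: List[str],
--     expected: List[str]
-- ) -> Optional[int]:
--     """
--     Encuentra la posición (1-indexed) del primer documento relevante.
--
--     Args:
--         retrieved: Documentos retornados
--         expected: Documentos relevantes
--
--     Returns:
--         Posición (1-based) o None si no hay relevantes
--     """
--     for i, doc in enumerate(retrieved, start=1):
--         if doc in expected:
--             return i
--     return None
-- ===== SOURCE B (Python) =====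
-- from typing import List, Optional
--
--
-- def first_relevant_position(
--     retrieved: List[str],
--     expected: List[str]
-- ) -> Optional[int]:
--     # Build an index: doc -> first 1-indexed position in retrieved.
--     pos = {}
--     for i, doc in enumerate(retrieved, start=1):
--         if doc not in pos:
--             pos[doc] = i
--     candidates = [pos[doc] for doc in expected if doc in pos]
--     return min(candidates) if candidates else None
-- ===== Notes on version B (the rewrite author's own statement) =====
-- stated objective: alternative
-- what changed: Instead of scanning retrieved and testing each doc's membership in expected, B builds a dict from each retrieved doc to its first 1-indexed position in one pass and then takes the minimum indexed position over expected.
import Mathlib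
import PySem

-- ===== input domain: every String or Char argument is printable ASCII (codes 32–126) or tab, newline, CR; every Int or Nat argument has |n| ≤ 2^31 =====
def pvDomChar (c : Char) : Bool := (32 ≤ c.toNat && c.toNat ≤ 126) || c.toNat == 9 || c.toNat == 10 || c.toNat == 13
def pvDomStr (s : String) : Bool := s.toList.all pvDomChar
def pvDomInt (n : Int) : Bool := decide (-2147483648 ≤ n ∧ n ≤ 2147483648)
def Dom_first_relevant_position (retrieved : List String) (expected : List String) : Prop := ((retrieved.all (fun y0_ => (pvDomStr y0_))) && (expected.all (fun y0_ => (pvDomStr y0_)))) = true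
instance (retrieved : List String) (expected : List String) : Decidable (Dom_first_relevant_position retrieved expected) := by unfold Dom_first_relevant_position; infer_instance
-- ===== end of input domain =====

-- B replaces A's scan of `retrieved` with a membership test in `expected` by the reverse
-- traversal: a dict from each retrieved doc to its first 1-indexed position, then the
-- minimum of the positions indexed by `expected` (alternative decomposition, same result).

-- ===== PORT A =====
-- the `for i, doc in enumerate(retrieved, start=1)` loop with early return
def frpGo (retrieved : List String) (expected : List String) (i : Int) : Option Int :=
  match retrieved with
  | [] => none
  | doc :: rest => if doc ∈ expected then some i else frpGo rest expected (i + 1)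

def first_relevant_position (retrieved : List String) (expected : List String) : Option Int :=
  frpGo retrieved expected 1

-- ===== PORT B =====
-- the `for i, doc in enumerate(retrieved, start=1): if doc not in pos: pos[doc] = i` loop
def frpBuild (pairs : List (Int × String)) (pos : PySem.Dict String Int) : PySem.Dict String Int :=
  match pairs with
  | [] => pos
  | (i, doc) :: rest => frpBuild rest (if pos.contains doc then pos else pos.insert doc i)

def first_relevant_position_alt (retrieved : List String) (expected : List String) : Option Int :=
  let pos := frpBuild (PySem.List.enumerate retrieved 1) PySem.Dict.empty
  let candidates := expected.filterMap (fun doc => pos.get? doc)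
  PySem.List.min? candidates (fun x => x)

-- ===== PRECONDITION & SPEC =====
def Spec_first_relevant_position (retrieved : List String) (expected : List String) (out : Option Int) : Prop := out = first_relevant_position_alt retrieved expected
instance (retrieved : List String) (expected : List String) (out : Option Int) : Decidable (Spec_first_relevant_position retrieved expected out) := by unfold Spec_first_relevant_position; infer_instance

-- ===== CLAIM (what is proved, stated in full; the proofs are below) =====
def Claim_equal_first_relevant_position : Prop := ∀ (retrieved : List String) (expected : List String), Dom_first_relevant_position retrieved expected → Spec_first_relevant_position retrieved expected (first_relevant_position retrieved expected)

-- ===== LEMMAS AND PROOFS =====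

-- the 1-indexed-from-i position of doc's first occurrence in xs (proof-only abbreviation)
def candAt (xs : List String) (i : Int) (doc : String) : Option Int :=
  match PySem.List.index? xs doc with
  | none => none
  | some k => some (i + (k : Int))

theorem candAt_cons_self (x : String) (rest : List String) (i : Int) :
    candAt (x :: rest) i x = some i := by
  unfold candAt
  rw [PySem.List.index?_cons_self]
  simp

theorem candAt_cons_ne (x : String) (rest : List String) (i : Int) (doc : String)
    (h : x ≠ doc) : candAt (x :: rest) i doc = candAt rest (i + 1) doc := by
  unfold candAt
  rw [PySem.List.index?_cons_of_ne rest h]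
  cases PySem.List.index? rest doc <;> simp <;> ring

-- lookup in the built dict = first-occurrence position offset from the start index
theorem frpBuild_get? (xs : List String) (i : Int) (pos : PySem.Dict String Int)
    (doc : String) :
    (frpBuild (PySem.List.enumerate xs i) pos).get? doc =
      match pos.get? doc with
      | some v => some v
      | none => candAt xs i doc := by
  induction xs generalizing i pos with
  | nil =>
    simp only [PySem.List.enumerate_nil, frpBuild, candAt,
      PySem.List.index?_eq_idxOf?, List.idxOf?_nil]
    cases pos.get? doc <;> rfl
  | cons x rest ih =>
    rw [PySem.List.enumerate_cons]
    simp only [frpBuild]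
    rw [ih]
    by_cases hx : x = doc
    · subst hx
      by_cases hc : pos.contains x = true
      · rw [if_pos hc]
        rcases h : pos.get? x with _ | v
        · exfalso
          rw [PySem.Dict.contains_eq_isSome_get?, h] at hc
          simp at hc
        · rfl
      · have hg : pos.get? x = none := by
          rw [PySem.Dict.contains_eq_isSome_get?] at hc
          cases h : pos.get? x
          · rfl
          · simp [h] at hc
        rw [if_neg hc, hg, PySem.Dict.get?_insert_self]
        exact (candAt_cons_self x rest i).symm
    · have hpos : (if pos.contains x = true then pos else pos.insert x i).get? doc
          = pos.get? doc := by
        split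
        · rfl
        · exact PySem.Dict.get?_insert_of_ne pos i (fun h => hx h.symm)
      rw [hpos]
      rcases h : pos.get? doc with _ | v
      · exact (candAt_cons_ne x rest i doc hx).symm
      · rfl

-- min? with identity key returns the given lower bound when it is a member
theorem min?_eq_of_mem_of_le (L : List Int) (i : Int) (hmem : i ∈ L)
    (hle : ∀ y ∈ L, i ≤ y) : PySem.List.min? L (fun x => x) = some i := by
  rcases h : PySem.List.min? L (fun x => x) with _ | m
  · rw [PySem.List.min?_eq_none_iff] at h
    subst h; simp at hmem
  · have h1 : m ≤ i := PySem.List.min?_isMin (key := fun x => x) h i hmem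
    have h2 : i ≤ m := hle m (PySem.List.min?_mem h)
    exact congrArg some (le_antisymm h1 h2)

-- A's early-return scan = minimum over expected of first-occurrence positions
theorem frpGo_eq_min? (xs : List String) (expected : List String) (i : Int) :
    frpGo xs expected i =
      PySem.List.min? (expected.filterMap (candAt xs i)) (fun x => x) := by
  induction xs generalizing i with
  | nil =>
    have : expected.filterMap (candAt [] i) = [] := by
      simp [candAt, PySem.List.index?_eq_idxOf?, List.idxOf?_nil]
    rw [this]
    simp only [frpGo]
    rfl
  | cons x rest ih =>
    simp only [frpGo]
    by_cases hx : x ∈ expected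
    · rw [if_pos hx]
      symm
      apply min?_eq_of_mem_of_le
      · exact List.mem_filterMap.mpr ⟨x, hx, candAt_cons_self x rest i⟩
      · intro y hy
        rcases List.mem_filterMap.mp hy with ⟨doc, _, hdoc⟩
        unfold candAt at hdoc
        rcases hk : PySem.List.index? (x :: rest) doc with _ | k <;> rw [hk] at hdoc
        · simp at hdoc
        · simp at hdoc
          omega
    · rw [if_neg hx, ih]
      congr 1
      apply List.filterMap_congr
      intro doc hdoc
      exact (candAt_cons_ne x rest i doc (fun h => hx (h ▸ hdoc))).symm

-- ===== VERDICT (by name: the statement is the Claim_ definition above) =====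
theorem first_relevant_position_spec : Claim_equal_first_relevant_position := by
  intro retrieved expected _
  unfold Spec_first_relevant_position first_relevant_position first_relevant_position_alt
  rw [frpGo_eq_min?]
  congr 1
  apply List.filterMap_congr
  intro doc _
  rw [frpBuild_get? retrieved 1 PySem.Dict.empty doc]
  simp [PySem.Dict.get?_empty]
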